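-- pv_equiv track=rewrite | github.com/zcvfcat/algorithm | 0.test/dfs.bfs.py | dfs
-- ===== SOURCE A (Python) =====
-- def dfs(graph: list[int], visited: list[int], node: int, end: int):
--     if node == end:
--         return visited[end]
--
--     for edge in graph[node]:
--         if visited[edge] == -1:
--             visited[edge] = visited[node] + 1
--             result = dfs(graph, visited, edge, end)
--             if result != None:
--                 return result
--
--     return None
-- ===== SOURCE B (Python) =====
-- def _scan(adj, i, visited):
--     # first index j >= i whose edge is unvisited, together with that edge
--     while i < len(adj):
--         e = adj[i]
--         if visited[e] == -1:
--             return i, e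
--         i += 1
--     return None
--
--
-- def dfs(graph: list[int], visited: list[int], node: int, end: int):
--     # iterative DFS: explicit stack of (node, next-edge-index) frames,
--     # marking depth on descend exactly as the recursive version does
--     if node == end:
--         return visited[end]
--     stack = [(node, 0)]
--     while stack:
--         n, i = stack[-1]
--         found = _scan(graph[n], i, visited)
--         if found is None:
--             stack.pop()
--             continue
--         j, e = found
--         visited[e] = visited[n] + 1
--         if e == end:
--             return visited[end]
--         stack[-1] = (n, j + 1)
--         stack.append((e, 0))
--     return None
-- ===== Notes on version B (the rewrite author's own statement) =====
-- stated objective: alternative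
-- what changed: Replaces the recursion by an iterative DFS over an explicit stack of (node, next-edge-index) frames that marks depth on descend, instead of recursive calls threading through the call stack.
-- outside the precondition, e.g. on dfs([[1], []], [-2, -1], 0, 1): A returns -1, B returns -1; on dfs([[-1], []], [-1, -1], 0, 1): A returns None, B returns None
import Mathlib
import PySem

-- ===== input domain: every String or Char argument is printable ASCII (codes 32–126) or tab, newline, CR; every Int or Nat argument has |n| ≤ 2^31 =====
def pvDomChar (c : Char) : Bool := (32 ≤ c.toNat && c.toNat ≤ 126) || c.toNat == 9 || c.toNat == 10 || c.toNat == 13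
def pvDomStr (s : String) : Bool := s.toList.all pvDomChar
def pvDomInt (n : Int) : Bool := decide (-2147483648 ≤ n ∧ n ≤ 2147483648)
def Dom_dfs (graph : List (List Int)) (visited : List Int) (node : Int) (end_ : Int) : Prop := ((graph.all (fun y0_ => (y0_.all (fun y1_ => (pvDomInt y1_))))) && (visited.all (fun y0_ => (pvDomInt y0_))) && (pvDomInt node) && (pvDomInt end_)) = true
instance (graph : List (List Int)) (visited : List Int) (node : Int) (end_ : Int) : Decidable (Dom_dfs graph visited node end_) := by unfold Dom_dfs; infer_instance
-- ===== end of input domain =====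

-- B replaces A's recursion by an iterative DFS over an explicit stack of (node, next-edge-index)
-- frames, marking depth on descend; both mutate `visited` identically in Python, and the
-- proved equivalence is about the return value.

-- ===== PORT A =====
-- A is recursive and mutates `visited`; the port threads the visited list through and returns
-- (result, visited'); `fuel` is a totality guard only — under Pre_dfs the recursion depth is
-- bounded by the number of -1 entries, so the top-level fuel (visited.length + 1) never runs out.
mutual
def dfsAgo (graph : List (List Int)) (end_ : Int) : Nat → List Int → Int → Option Int × List Int
  | 0, vis, _ => (none, vis)
  | fuel + 1, vis, node =>
    if node = end_ then (some (PySem.List.pyGetD vis end_ 0), vis)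
    else dfsAloop graph end_ fuel vis node (PySem.List.pyGetD graph node [])
termination_by fuel _ _ => (fuel, 0)

def dfsAloop (graph : List (List Int)) (end_ : Int) : Nat → List Int → Int → List Int → Option Int × List Int
  | _, vis, _, [] => (none, vis)
  | fuel, vis, node, e :: es =>
    if PySem.List.pyGetD vis e 0 = -1 then
      let vis1 := PySem.List.pySetD vis e (PySem.List.pyGetD vis node 0 + 1)
      match dfsAgo graph end_ fuel vis1 e with
      | (some v, vis2) => (some v, vis2)
      | (none, vis2) => dfsAloop graph end_ fuel vis2 node es
    else dfsAloop graph end_ fuel vis node es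
termination_by fuel _ _ es => (fuel, es.length + 1)
end

def dfs (graph : List (List Int)) (visited : List Int) (node : Int) (end_ : Int) : Option Int :=
  (dfsAgo graph end_ (visited.length + 1) visited node).1

-- ===== PORT B =====
-- helper _scan: first index j ≥ i of adj whose edge is unvisited, with that edge
def scanB (visited adj : List Int) (i : Nat) : Option (Nat × Int) :=
  if h : i < adj.length then
    if PySem.List.pyGetD visited (adj[i]) 0 = -1 then some (i, adj[i])
    else scanB visited adj (i + 1)
  else none
termination_by adj.length - i

-- the `while stack:` loop; `fuel` is a totality guard only (see dfsAgo)
def stepB (graph : List (List Int)) (end_ : Int) : Nat → List (Int × Nat) → List Int → Option Int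
  | 0, _, _ => none
  | _ + 1, [], _ => none
  | fuel + 1, (n, i) :: rest, vis =>
    match scanB vis (PySem.List.pyGetD graph n []) i with
    | none => stepB graph end_ fuel rest vis
    | some (j, e) =>
      let vis1 := PySem.List.pySetD vis e (PySem.List.pyGetD vis n 0 + 1)
      if e = end_ then some (PySem.List.pyGetD vis1 end_ 0)
      else stepB graph end_ fuel ((e, 0) :: (n, j + 1) :: rest) vis1

def dfs_alt (graph : List (List Int)) (visited : List Int) (node : Int) (end_ : Int) : Option Int :=
  if node = end_ then some (PySem.List.pyGetD visited end_ 0)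
  else stepB graph end_ (2 * visited.length + 2) [(node, 0)] visited

-- ===== PRECONDITION & SPEC =====
-- Pre_dfs covers the immediate-return cases for arbitrary inputs (the start node is the
-- target, or no neighbour of the start node is unvisited) and, for searches that actually
-- descend, the natural domain of the function: graph and visited index the same node set
-- 0..n-1 (equal lengths, node/end_/all edges in [0,n)) with visited entries ≥ -1 (-1 =
-- unvisited marker).  It excludes inputs on which A raises IndexError or can recurse without
-- bound (entries < -1 feeding the depth assignment), and deep searches that only succeed
-- through Python's negative-index wraparound — accidents of the representation, not of the
-- function's domain (cites in claim.json).
def Pre_dfs (graph : List (List Int)) (visited : List Int) (node : Int) (end_ : Int) : Prop :=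
  (node = end_ ∧ PySem.Raise.InRange visited.length end_) ∨
  (¬ node = end_ ∧ PySem.Raise.InRange graph.length node ∧
    (∀ e ∈ PySem.List.pyGetD graph node [],
      PySem.Raise.InRange visited.length e ∧ PySem.List.pyGetD visited e 0 ≠ -1)) ∨
  (¬ node = end_ ∧
    graph.length = visited.length ∧
    0 ≤ node ∧ node < (graph.length : Int) ∧
    0 ≤ end_ ∧ end_ < (graph.length : Int) ∧
    (∀ adj ∈ graph, ∀ e ∈ adj, 0 ≤ e ∧ e < (graph.length : Int)) ∧
    (∀ v ∈ visited, -1 ≤ v))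
instance (graph : List (List Int)) (visited : List Int) (node : Int) (end_ : Int) : Decidable (Pre_dfs graph visited node end_) := by unfold Pre_dfs; infer_instance

def pvWitness_dfs : List (List Int) × List Int × Int × Int := ([[1, 2], [0], [1]], [0, -1, -1], 0, 2)

def Spec_dfs (graph : List (List Int)) (visited : List Int) (node : Int) (end_ : Int) (out : Option Int) : Prop := out = dfs_alt graph visited node end_
instance (graph : List (List Int)) (visited : List Int) (node : Int) (end_ : Int) (out : Option Int) : Decidable (Spec_dfs graph visited node end_ out) := by unfold Spec_dfs; infer_instance

-- ===== CLAIM (what is proved, stated in full; the proofs are below) =====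
def Claim_equal_dfs : Prop := ∀ (graph : List (List Int)) (visited : List Int) (node : Int) (end_ : Int), Dom_dfs graph visited node end_ → Pre_dfs graph visited node end_ → Spec_dfs graph visited node end_ (dfs graph visited node end_)

-- ===== LEMMAS AND PROOFS =====

-- number of unvisited (-1) entries
def cnt (vis : List Int) : Nat := vis.countP (fun v => v = -1)

-- invariants
def GoodVis (graph : List (List Int)) (vis : List Int) : Prop :=
  graph.length = vis.length ∧ (∀ v ∈ vis, -1 ≤ v)
def ValidNode (graph : List (List Int)) (n : Int) : Prop :=
  0 ≤ n ∧ n < (graph.length : Int)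
def GoodGraph (graph : List (List Int)) : Prop :=
  ∀ adj ∈ graph, ∀ e ∈ adj, ValidNode graph e
def ValidStack (graph : List (List Int)) (st : List (Int × Nat)) : Prop :=
  ∀ f ∈ st, ValidNode graph f.1

lemma cnt_le_length (vis : List Int) : cnt vis ≤ vis.length := List.countP_le_length

lemma toNat_lt {graph : List (List Int)} {vis : List Int} {n : Int}
    (hG : GoodVis graph vis) (hn : ValidNode graph n) : n.toNat < vis.length := by
  rcases hG with ⟨hl, -⟩; rcases hn with ⟨h0, h1⟩; omega

lemma getv_eq {graph : List (List Int)} {vis : List Int} {n : Int}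
    (hG : GoodVis graph vis) (hn : ValidNode graph n) :
    PySem.List.pyGetD vis n 0 = vis[n.toNat]'(toNat_lt hG hn) := by
  exact PySem.List.pyGetD_eq_getElem vis 0 hn.1 (by have := toNat_lt hG hn; omega)

lemma cnt_set_mark (vis : List Int) (k : Nat) (w : Int) (hk : k < vis.length)
    (h1 : vis[k] = -1) (h2 : w ≠ -1) : cnt (vis.set k w) + 1 = cnt vis := by
  induction vis generalizing k with
  | nil => simp at hk
  | cons x xs ih =>
    cases k with
    | zero => simp_all [cnt]
    | succ k =>
      simp only [List.set_cons_succ, cnt, List.countP_cons] at *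
      have := ih k (by simpa using hk) (by simpa using h1)
      omega

lemma cnt_pos (vis : List Int) (k : Nat) (hk : k < vis.length) (h1 : vis[k] = -1) :
    1 ≤ cnt vis := by
  rcases Nat.eq_zero_or_pos (cnt vis) with h | h
  · exfalso
    have := (List.countP_eq_zero.mp h) vis[k] (List.getElem_mem hk)
    simp [h1] at this
  · exact h

-- marking an unvisited node: invariants and count
lemma mark_lemma {graph : List (List Int)} {vis : List Int} {n ed : Int}
    (hG : GoodVis graph vis) (hn : ValidNode graph n) (he : ValidNode graph ed)
    (hm : PySem.List.pyGetD vis ed 0 = -1) :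
    GoodVis graph (PySem.List.pySetD vis ed (PySem.List.pyGetD vis n 0 + 1)) ∧
      cnt (PySem.List.pySetD vis ed (PySem.List.pyGetD vis n 0 + 1)) + 1 = cnt vis := by
  have hke := toNat_lt hG he
  have hset : PySem.List.pySetD vis ed (PySem.List.pyGetD vis n 0 + 1)
      = vis.set ed.toNat (PySem.List.pyGetD vis n 0 + 1) :=
    PySem.List.pySetD_of_nonneg vis _ he.1
  have hval : PySem.List.pyGetD vis n 0 + 1 ≠ -1 := by
    rw [getv_eq hG hn]
    have := hG.2 (vis[n.toNat]'(toNat_lt hG hn)) (List.getElem_mem _)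
    omega
  have hed : vis[ed.toNat]'hke = -1 := by rw [← getv_eq hG he]; exact hm
  constructor
  · constructor
    · rw [hset]; simpa using hG.1
    · intro v hv
      rw [hset] at hv
      rcases List.mem_or_eq_of_mem_set hv with h | h
      · exact hG.2 v h
      · subst h
        rw [getv_eq hG hn]
        have := hG.2 (vis[n.toNat]'(toNat_lt hG hn)) (List.getElem_mem _)
        omega
  · rw [hset]; exact cnt_set_mark vis ed.toNat _ hke hed hval

-- unfolding lemmas
lemma ago_zero (g : List (List Int)) (e_ : Int) (vis : List Int) (n : Int) :
    dfsAgo g e_ 0 vis n = (none, vis) := by simp only [dfsAgo]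

lemma ago_succ (g : List (List Int)) (e_ : Int) (f : Nat) (vis : List Int) (n : Int) :
    dfsAgo g e_ (f + 1) vis n =
      if n = e_ then (some (PySem.List.pyGetD vis e_ 0), vis)
      else dfsAloop g e_ f vis n (PySem.List.pyGetD g n []) := by
  simp only [dfsAgo]

lemma loop_nil (g : List (List Int)) (e_ : Int) (f : Nat) (vis : List Int) (n : Int) :
    dfsAloop g e_ f vis n [] = (none, vis) := by simp only [dfsAloop]

lemma loop_cons_mark (g : List (List Int)) (e_ : Int) (f : Nat) (vis : List Int) (n x : Int)
    (xs : List Int) (hm : PySem.List.pyGetD vis x 0 = -1) :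
    dfsAloop g e_ f vis n (x :: xs) =
      (match dfsAgo g e_ f (PySem.List.pySetD vis x (PySem.List.pyGetD vis n 0 + 1)) x with
       | (some v, vis2) => (some v, vis2)
       | (none, vis2) => dfsAloop g e_ f vis2 n xs) := by
  conv_lhs => rw [dfsAloop]
  simp only [hm, if_pos]

lemma loop_cons_mark_some (g : List (List Int)) (e_ : Int) (f : Nat) (vis : List Int)
    (n x : Int) (xs : List Int) (v : Int) (vis2 : List Int)
    (hm : PySem.List.pyGetD vis x 0 = -1)
    (hr : dfsAgo g e_ f (PySem.List.pySetD vis x (PySem.List.pyGetD vis n 0 + 1)) x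
      = (some v, vis2)) :
    dfsAloop g e_ f vis n (x :: xs) = (some v, vis2) := by
  rw [loop_cons_mark g e_ f vis n x xs hm, hr]

lemma loop_cons_mark_none (g : List (List Int)) (e_ : Int) (f : Nat) (vis : List Int)
    (n x : Int) (xs : List Int) (vis2 : List Int)
    (hm : PySem.List.pyGetD vis x 0 = -1)
    (hr : dfsAgo g e_ f (PySem.List.pySetD vis x (PySem.List.pyGetD vis n 0 + 1)) x
      = (none, vis2)) :
    dfsAloop g e_ f vis n (x :: xs) = dfsAloop g e_ f vis2 n xs := by
  rw [loop_cons_mark g e_ f vis n x xs hm, hr]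

lemma loop_cons_skip (g : List (List Int)) (e_ : Int) (f : Nat) (vis : List Int) (n x : Int)
    (xs : List Int) (hm : ¬ PySem.List.pyGetD vis x 0 = -1) :
    dfsAloop g e_ f vis n (x :: xs) = dfsAloop g e_ f vis n xs := by
  conv_lhs => rw [dfsAloop]
  simp only [hm, if_neg, not_false_iff]

lemma step_nil (g : List (List Int)) (e_ : Int) (f : Nat) (vis : List Int) :
    stepB g e_ (f + 1) [] vis = none := rfl

lemma step_cons (g : List (List Int)) (e_ : Int) (f : Nat) (n : Int) (i : Nat)
    (rest : List (Int × Nat)) (vis : List Int) :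
    stepB g e_ (f + 1) ((n, i) :: rest) vis =
      (match scanB vis (PySem.List.pyGetD g n []) i with
       | none => stepB g e_ f rest vis
       | some (j, ed) =>
         let vis1 := PySem.List.pySetD vis ed (PySem.List.pyGetD vis n 0 + 1)
         if ed = e_ then some (PySem.List.pyGetD vis1 e_ 0)
         else stepB g e_ f ((ed, 0) :: (n, j + 1) :: rest) vis1) := rfl

lemma step_cons_none (g : List (List Int)) (e_ : Int) (f : Nat) (n : Int) (i : Nat)
    (rest : List (Int × Nat)) (vis : List Int)
    (hscan : scanB vis (PySem.List.pyGetD g n []) i = none) :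
    stepB g e_ (f + 1) ((n, i) :: rest) vis = stepB g e_ f rest vis := by
  rw [step_cons, hscan]

lemma step_cons_found (g : List (List Int)) (e_ : Int) (f : Nat) (n : Int) (i : Nat)
    (rest : List (Int × Nat)) (vis : List Int) (j : Nat) (ed : Int)
    (hscan : scanB vis (PySem.List.pyGetD g n []) i = some (j, ed)) (he : ed = e_) :
    stepB g e_ (f + 1) ((n, i) :: rest) vis =
      some (PySem.List.pyGetD
        (PySem.List.pySetD vis ed (PySem.List.pyGetD vis n 0 + 1)) e_ 0) := by
  rw [step_cons, hscan]; simp [he]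

lemma step_cons_desc (g : List (List Int)) (e_ : Int) (f : Nat) (n : Int) (i : Nat)
    (rest : List (Int × Nat)) (vis : List Int) (j : Nat) (ed : Int)
    (hscan : scanB vis (PySem.List.pyGetD g n []) i = some (j, ed)) (he : ¬ ed = e_) :
    stepB g e_ (f + 1) ((n, i) :: rest) vis =
      stepB g e_ f ((ed, 0) :: (n, j + 1) :: rest)
        (PySem.List.pySetD vis ed (PySem.List.pyGetD vis n 0 + 1)) := by
  rw [step_cons, hscan]; simp [he]

lemma scanB_ge (vis adj : List Int) (i : Nat) (h : ¬ i < adj.length) :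
    scanB vis adj i = none := by
  rw [scanB]; simp [h]

lemma scanB_lt_mark (vis adj : List Int) (i : Nat) (h : i < adj.length)
    (hm : PySem.List.pyGetD vis (adj[i]) 0 = -1) :
    scanB vis adj i = some (i, adj[i]) := by
  rw [scanB]; simp [h, hm]

lemma scanB_lt_skip (vis adj : List Int) (i : Nat) (h : i < adj.length)
    (hm : ¬ PySem.List.pyGetD vis (adj[i]) 0 = -1) :
    scanB vis adj i = scanB vis adj (i + 1) := by
  conv_lhs => rw [scanB]
  simp [h, hm]

lemma scanB_some_spec (vis adj : List Int) : ∀ k i j ed, adj.length - i ≤ k →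
    scanB vis adj i = some (j, ed) →
    ∃ h : j < adj.length, ed = adj[j] ∧ PySem.List.pyGetD vis ed 0 = -1 := by
  intro k
  induction k with
  | zero =>
    intro i j ed hk hs
    rw [scanB_ge vis adj i (by omega)] at hs
    exact absurd hs (by simp)
  | succ k ih =>
    intro i j ed hk hs
    by_cases hi : i < adj.length
    · by_cases hm : PySem.List.pyGetD vis (adj[i]) 0 = -1
      · rw [scanB_lt_mark vis adj i hi hm] at hs
        obtain ⟨rfl, rfl⟩ : i = j ∧ adj[i] = ed := by
          constructor <;> · injection hs with h'; cases h'; rfl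
        exact ⟨hi, rfl, hm⟩
      · rw [scanB_lt_skip vis adj i hi hm] at hs
        exact ih (i + 1) j ed (by omega) hs
    · rw [scanB_ge vis adj i hi] at hs
      exact absurd hs (by simp)

-- A's loop over adj.drop i, phrased through scanB
lemma loop_drop (g : List (List Int)) (e_ : Int) (adj : List Int) : ∀ k i f vis n,
    adj.length - i ≤ k →
    dfsAloop g e_ f vis n (adj.drop i) =
      (match scanB vis adj i with
       | none => ((none : Option Int), vis)
       | some (j, ed) => dfsAloop g e_ f vis n (ed :: adj.drop (j + 1))) := by
  intro k
  induction k with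
  | zero =>
    intro i f vis n hk
    rw [List.drop_eq_nil_of_le (by omega), scanB_ge vis adj i (by omega), loop_nil]
  | succ k ih =>
    intro i f vis n hk
    by_cases hi : i < adj.length
    · rw [List.drop_eq_getElem_cons hi]
      by_cases hm : PySem.List.pyGetD vis (adj[i]) 0 = -1
      · rw [scanB_lt_mark vis adj i hi hm]
      · rw [scanB_lt_skip vis adj i hi hm, loop_cons_skip g e_ f vis n _ _ hm]
        exact ih (i + 1) f vis n (by omega)
    · rw [List.drop_eq_nil_of_le (by omega), scanB_ge vis adj i hi, loop_nil]

-- elements of graph[n] are valid nodes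
lemma adj_valid {g : List (List Int)} {n : Int} (hGG : GoodGraph g) (hn : ValidNode g n) :
    ∀ x ∈ PySem.List.pyGetD g n [], ValidNode g x := by
  have hlt : n.toNat < g.length := by rcases hn with ⟨h0, h1⟩; omega
  rw [PySem.List.pyGetD_eq_getElem g [] hn.1 (by omega)]
  exact hGG (g[n.toNat]) (List.getElem_mem hlt)

-- preservation: GoodVis is kept and cnt never grows
lemma presLoop_of (g : List (List Int)) (e_ : Int) (f : Nat) (hGG : GoodGraph g)
    (hA : ∀ vis n, GoodVis g vis → ValidNode g n →
      GoodVis g (dfsAgo g e_ f vis n).2 ∧ cnt (dfsAgo g e_ f vis n).2 ≤ cnt vis) :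
    ∀ es vis n, GoodVis g vis → ValidNode g n → (∀ x ∈ es, ValidNode g x) →
      GoodVis g (dfsAloop g e_ f vis n es).2 ∧ cnt (dfsAloop g e_ f vis n es).2 ≤ cnt vis := by
  intro es
  induction es with
  | nil => intro vis n hG hn _; rw [loop_nil]; exact ⟨hG, le_refl _⟩
  | cons x xs ih =>
    intro vis n hG hn hval
    have hx : ValidNode g x := hval x (by simp)
    by_cases hm : PySem.List.pyGetD vis x 0 = -1
    · obtain ⟨hG1, hc1⟩ := mark_lemma hG hn hx hm
      obtain ⟨hG2, hc2⟩ := hA _ x hG1 hx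
      rcases hr : dfsAgo g e_ f (PySem.List.pySetD vis x (PySem.List.pyGetD vis n 0 + 1)) x
        with ⟨r, vis2⟩
      rw [hr] at hG2 hc2
      replace hG2 : GoodVis g vis2 := hG2
      replace hc2 : cnt vis2 ≤ cnt (PySem.List.pySetD vis x (PySem.List.pyGetD vis n 0 + 1)) :=
        hc2
      cases r with
      | some v =>
        rw [loop_cons_mark_some g e_ f vis n x xs v vis2 hm hr]
        refine ⟨hG2, ?_⟩
        show cnt vis2 ≤ cnt vis
        omega
      | none =>
        rw [loop_cons_mark_none g e_ f vis n x xs vis2 hm hr]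
        obtain ⟨hG3, hc3⟩ := ih vis2 n hG2 hn (fun y hy => hval y (by simp [hy]))
        exact ⟨hG3, by omega⟩
    · rw [loop_cons_skip g e_ f vis n x xs hm]
      exact ih vis n hG hn (fun y hy => hval y (by simp [hy]))

lemma presA (g : List (List Int)) (e_ : Int) (hGG : GoodGraph g) : ∀ f vis n,
    GoodVis g vis → ValidNode g n →
    GoodVis g (dfsAgo g e_ f vis n).2 ∧ cnt (dfsAgo g e_ f vis n).2 ≤ cnt vis := by
  intro f
  induction f with
  | zero => intro vis n hG _; rw [ago_zero]; exact ⟨hG, le_refl _⟩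
  | succ f ih =>
    intro vis n hG hn
    rw [ago_succ]
    by_cases hne : n = e_
    · simp only [hne, if_pos]; exact ⟨hG, le_refl _⟩
    · simp only [hne, if_neg, not_false_iff]
      exact presLoop_of g e_ f hGG ih _ vis n hG hn (adj_valid hGG hn)

lemma presLoop (g : List (List Int)) (e_ : Int) (hGG : GoodGraph g) : ∀ f es vis n,
    GoodVis g vis → ValidNode g n → (∀ x ∈ es, ValidNode g x) →
    GoodVis g (dfsAloop g e_ f vis n es).2 ∧ cnt (dfsAloop g e_ f vis n es).2 ≤ cnt vis :=
  fun f => presLoop_of g e_ f hGG (presA g e_ hGG f)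

-- cnt is positive when some valid node is unvisited
lemma cnt_pos_of_mark {g : List (List Int)} {vis : List Int} {x : Int}
    (hG : GoodVis g vis) (hx : ValidNode g x) (hm : PySem.List.pyGetD vis x 0 = -1) :
    1 ≤ cnt vis := by
  have := getv_eq hG hx
  exact cnt_pos vis x.toNat (toNat_lt hG hx) (by rw [← this]; exact hm)

-- fuel irrelevance for the A port
lemma fuelIrrA (g : List (List Int)) (e_ : Int) (hGG : GoodGraph g) : ∀ c : Nat,
    (∀ f1 f2 vis n, cnt vis = c → c < f1 → c < f2 → GoodVis g vis → ValidNode g n →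
      dfsAgo g e_ f1 vis n = dfsAgo g e_ f2 vis n) ∧
    (∀ es f1 f2 vis n, cnt vis = c → c ≤ f1 → c ≤ f2 → GoodVis g vis → ValidNode g n →
      (∀ x ∈ es, ValidNode g x) →
      dfsAloop g e_ f1 vis n es = dfsAloop g e_ f2 vis n es) := by
  intro c
  induction c using Nat.strong_induction_on with
  | _ c IH =>
  have hloop : ∀ es f1 f2 vis n, cnt vis = c → c ≤ f1 → c ≤ f2 → GoodVis g vis →
      ValidNode g n → (∀ x ∈ es, ValidNode g x) →
      dfsAloop g e_ f1 vis n es = dfsAloop g e_ f2 vis n es := by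
    intro es
    induction es with
    | nil => intro f1 f2 vis n _ _ _ _ _ _; rw [loop_nil, loop_nil]
    | cons x xs ihes =>
      intro f1 f2 vis n hc h1 h2 hG hn hval
      have hx : ValidNode g x := hval x (by simp)
      by_cases hm : PySem.List.pyGetD vis x 0 = -1
      · obtain ⟨hG1, hc1⟩ := mark_lemma hG hn hx hm
        have hcpos : 1 ≤ c := hc ▸ cnt_pos_of_mark hG hx hm
        set vis1 := PySem.List.pySetD vis x (PySem.List.pyGetD vis n 0 + 1) with hv1
        have hAgoEq : dfsAgo g e_ f1 vis1 x = dfsAgo g e_ f2 vis1 x :=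
          (IH (cnt vis1) (by omega)).1 f1 f2 vis1 x rfl (by omega) (by omega) hG1 hx
        obtain ⟨hG2, hc2⟩ := presA g e_ hGG f1 vis1 x hG1 hx
        rcases hr : dfsAgo g e_ f1 vis1 x with ⟨r, vis2⟩
        have hr2 : dfsAgo g e_ f2 vis1 x = (r, vis2) := by rw [← hAgoEq, hr]
        rw [hr] at hG2 hc2
        replace hG2 : GoodVis g vis2 := hG2
        replace hc2 : cnt vis2 ≤ cnt vis1 := hc2
        cases r with
        | some v =>
          rw [loop_cons_mark_some g e_ f1 vis n x xs v vis2 hm hr,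
            loop_cons_mark_some g e_ f2 vis n x xs v vis2 hm hr2]
        | none =>
          rw [loop_cons_mark_none g e_ f1 vis n x xs vis2 hm hr,
            loop_cons_mark_none g e_ f2 vis n x xs vis2 hm hr2]
          exact (IH (cnt vis2) (by omega)).2 xs f1 f2 vis2 n rfl (by omega) (by omega)
            hG2 hn (fun y hy => hval y (by simp [hy]))
      · rw [loop_cons_skip g e_ f1 vis n x xs hm, loop_cons_skip g e_ f2 vis n x xs hm]
        exact ihes f1 f2 vis n hc h1 h2 hG hn (fun y hy => hval y (by simp [hy]))
  refine ⟨?_, hloop⟩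
  intro f1 f2 vis n hc h1 h2 hG hn
  obtain ⟨f1', rfl⟩ : ∃ k, f1 = k + 1 := ⟨f1 - 1, by omega⟩
  obtain ⟨f2', rfl⟩ : ∃ k, f2 = k + 1 := ⟨f2 - 1, by omega⟩
  rw [ago_succ, ago_succ]
  by_cases hne : n = e_
  · simp only [hne, if_pos]
  · simp only [hne, if_neg, not_false_iff]
    exact hloop _ f1' f2' vis n hc (by omega) (by omega) hG hn (adj_valid hGG hn)

-- fuel irrelevance for the B port
lemma fuelIrrB (g : List (List Int)) (e_ : Int) (hGG : GoodGraph g) : ∀ c : Nat,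
    ∀ st f1 f2 vis, cnt vis = c → GoodVis g vis → ValidStack g st →
    2 * c + st.length < f1 → 2 * c + st.length < f2 →
    stepB g e_ f1 st vis = stepB g e_ f2 st vis := by
  intro c
  induction c using Nat.strong_induction_on with
  | _ c IH =>
  intro st
  induction st with
  | nil =>
    intro f1 f2 vis _ _ _ h1 h2
    obtain ⟨f1', rfl⟩ : ∃ k, f1 = k + 1 := ⟨f1 - 1, by omega⟩
    obtain ⟨f2', rfl⟩ : ∃ k, f2 = k + 1 := ⟨f2 - 1, by omega⟩
    rw [step_nil, step_nil]
  | cons fr rest ihst =>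
    intro f1 f2 vis hc hG hst h1 h2
    obtain ⟨n, i⟩ := fr
    obtain ⟨f1', rfl⟩ : ∃ k, f1 = k + 1 := ⟨f1 - 1, by omega⟩
    obtain ⟨f2', rfl⟩ : ∃ k, f2 = k + 1 := ⟨f2 - 1, by omega⟩
    have hn : ValidNode g n := hst (n, i) (by simp)
    rcases hscan : scanB vis (PySem.List.pyGetD g n []) i with _ | ⟨j, ed⟩
    · rw [step_cons_none g e_ f1' n i rest vis hscan,
        step_cons_none g e_ f2' n i rest vis hscan]
      exact ihst f1' f2' vis hc hG (fun y hy => hst y (by simp [hy]))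
        (by simp at h1 ⊢; omega) (by simp at h2 ⊢; omega)
    · obtain ⟨hj, hedj, hm⟩ := scanB_some_spec vis (PySem.List.pyGetD g n [])
        (PySem.List.pyGetD g n []).length i j ed (by omega) hscan
      have hed : ValidNode g ed := hedj ▸ adj_valid hGG hn _ (List.getElem_mem hj)
      obtain ⟨hG1, hc1⟩ := mark_lemma hG hn hed hm
      have hcpos : 1 ≤ c := hc ▸ cnt_pos_of_mark hG hed hm
      by_cases he : ed = e_
      · rw [step_cons_found g e_ f1' n i rest vis j ed hscan he,
          step_cons_found g e_ f2' n i rest vis j ed hscan he]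
      · rw [step_cons_desc g e_ f1' n i rest vis j ed hscan he,
          step_cons_desc g e_ f2' n i rest vis j ed hscan he]
        refine IH (cnt (PySem.List.pySetD vis ed (PySem.List.pyGetD vis n 0 + 1))) (by omega)
          _ f1' f2' _ rfl hG1 ?_ ?_ ?_
        · intro y hy
          simp only [List.mem_cons] at hy
          rcases hy with rfl | rfl | hy
          · exact hed
          · exact hn
          · exact hst y (by simp [hy])
        · simp at h1 ⊢; omega
        · simp at h2 ⊢; omega

-- B's loop with its canonical (sufficient) fuel
def stepC (g : List (List Int)) (e_ : Int) (st : List (Int × Nat)) (vis : List Int) :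
    Option Int :=
  stepB g e_ (2 * cnt vis + st.length + 1) st vis

lemma stepC_cons (g : List (List Int)) (e_ : Int) (n : Int) (i : Nat)
    (K : List (Int × Nat)) (vis : List Int) :
    stepC g e_ ((n, i) :: K) vis
      = stepB g e_ (2 * cnt vis + K.length + 1 + 1) ((n, i) :: K) vis := by
  unfold stepC
  have : 2 * cnt vis + ((n, i) :: K).length + 1 = 2 * cnt vis + K.length + 1 + 1 := by
    simp only [List.length_cons]
    omega
  rw [this]

lemma loop_drop_none (g : List (List Int)) (e_ : Int) (adj : List Int) (i : Nat) (f : Nat)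
    (vis : List Int) (n : Int) (hscan : scanB vis adj i = none) :
    dfsAloop g e_ f vis n (adj.drop i) = (none, vis) := by
  rw [loop_drop g e_ adj adj.length i f vis n (by omega), hscan]

lemma loop_drop_some (g : List (List Int)) (e_ : Int) (adj : List Int) (i : Nat) (f : Nat)
    (vis : List Int) (n : Int) (j : Nat) (ed : Int)
    (hscan : scanB vis adj i = some (j, ed)) :
    dfsAloop g e_ f vis n (adj.drop i) = dfsAloop g e_ f vis n (ed :: adj.drop (j + 1)) := by
  rw [loop_drop g e_ adj adj.length i f vis n (by omega), hscan]

-- the stack machine simulates A's loop with an explicit continuation stack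
lemma sim (g : List (List Int)) (e_ : Int) (hGG : GoodGraph g) : ∀ c : Nat,
    ∀ vis n i K, cnt vis = c → GoodVis g vis → ValidNode g n → ValidStack g K →
    stepC g e_ ((n, i) :: K) vis =
      (match dfsAloop g e_ c vis n ((PySem.List.pyGetD g n []).drop i) with
       | (some v, _) => some v
       | (none, vis') => stepC g e_ K vis') := by
  intro c
  induction c using Nat.strong_induction_on with
  | _ c IH =>
  intro vis n i K hc hG hn hK
  subst hc
  have hadjval : ∀ x ∈ PySem.List.pyGetD g n [], ValidNode g x := adj_valid hGG hn
  rcases hscan : scanB vis (PySem.List.pyGetD g n []) i with _ | ⟨j, ed⟩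
  · -- no unvisited edge left: the frame is popped, A's loop leaves vis unchanged
    rw [loop_drop_none g e_ _ i _ vis n hscan, stepC_cons,
      step_cons_none g e_ _ n i K vis hscan]
    rfl
  · obtain ⟨hj, hedj, hm⟩ := scanB_some_spec vis (PySem.List.pyGetD g n [])
      (PySem.List.pyGetD g n []).length i j ed (by omega) hscan
    have hed : ValidNode g ed := hedj ▸ adj_valid hGG hn _ (List.getElem_mem hj)
    obtain ⟨hG1, hc1⟩ := mark_lemma hG hn hed hm
    have hcpos : 1 ≤ cnt vis := cnt_pos_of_mark hG hed hm
    set vis1 := PySem.List.pySetD vis ed (PySem.List.pyGetD vis n 0 + 1) with hv1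
    have hcsucc : cnt vis = cnt vis1 + 1 := by omega
    rw [loop_drop_some g e_ _ i _ vis n j ed hscan]
    by_cases he : ed = e_
    · -- the found edge is the target: both return its freshly assigned depth
      have hr : dfsAgo g e_ (cnt vis) vis1 ed = (some (PySem.List.pyGetD vis1 e_ 0), vis1) := by
        rw [hcsucc, ago_succ]
        simp [he]
      rw [loop_cons_mark_some g e_ _ vis n ed _ _ vis1 hm hr, stepC_cons,
        step_cons_found g e_ _ n i K vis j ed hscan he]
    · -- descend into ed
      rcases hr : dfsAloop g e_ (cnt vis1) vis1 ed (PySem.List.pyGetD g ed []) with ⟨r, vis2⟩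
      have hrAgo : dfsAgo g e_ (cnt vis) vis1 ed = (r, vis2) := by
        rw [hcsucc, ago_succ]
        simp only [he, if_neg, not_false_iff]
        exact hr
      obtain ⟨hG2, hc2⟩ := presLoop g e_ hGG (cnt vis1) (PySem.List.pyGetD g ed []) vis1 ed
        hG1 hed (adj_valid hGG hed)
      rw [hr] at hG2 hc2
      replace hG2 : GoodVis g vis2 := hG2
      replace hc2 : cnt vis2 ≤ cnt vis1 := hc2
      -- LHS: one machine step, then the IH for the pushed frame
      rw [stepC_cons, step_cons_desc g e_ _ n i K vis j ed hscan he, ← hv1]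
      have hstepC : stepB g e_ (2 * cnt vis + K.length + 1) ((ed, 0) :: (n, j + 1) :: K) vis1
          = stepC g e_ ((ed, 0) :: (n, j + 1) :: K) vis1 := by
        unfold stepC
        refine fuelIrrB g e_ hGG (cnt vis1) _ _ _ _ rfl hG1 ?_
          (by simp only [List.length_cons]; omega) (by simp only [List.length_cons]; omega)
        intro y hy
        simp only [List.mem_cons] at hy
        rcases hy with rfl | rfl | hy
        · exact hed
        · exact hn
        · exact hK y hy
      rw [hstepC]
      have hKvalid : ValidStack g ((n, j + 1) :: K) := by
        intro y hy
        simp only [List.mem_cons] at hy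
        rcases hy with rfl | hy
        · exact hn
        · exact hK y hy
      rw [IH (cnt vis1) (by omega) vis1 ed 0 ((n, j + 1) :: K) rfl hG1 hed hKvalid]
      rw [List.drop_zero, hr]
      cases r with
      | some v =>
        -- the recursive call found the target
        rw [loop_cons_mark_some g e_ _ vis n ed _ v vis2 hm hrAgo]
      | none =>
        -- the recursive call failed; resume the parent frame at j+1
        rw [loop_cons_mark_none g e_ _ vis n ed _ vis2 hm hrAgo]
        have hdropval : ∀ x ∈ (PySem.List.pyGetD g n []).drop (j + 1), ValidNode g x :=
          fun x hx => hadjval x (List.mem_of_mem_drop hx)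
        have hfi : dfsAloop g e_ (cnt vis) vis2 n ((PySem.List.pyGetD g n []).drop (j + 1))
            = dfsAloop g e_ (cnt vis2) vis2 n ((PySem.List.pyGetD g n []).drop (j + 1)) :=
          (fuelIrrA g e_ hGG (cnt vis2)).2 _ (cnt vis) (cnt vis2) vis2 n rfl (by omega)
            (by omega) hG2 hn hdropval
        rw [hfi]
        exact IH (cnt vis2) (by omega) vis2 n (j + 1) K rfl hG2 hn hK

lemma scanB_none_of (vis adj : List Int)
    (h : ∀ x ∈ adj, PySem.List.pyGetD vis x 0 ≠ -1) : ∀ k i, adj.length - i ≤ k →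
    scanB vis adj i = none := by
  intro k
  induction k with
  | zero => intro i hk; exact scanB_ge vis adj i (by omega)
  | succ k ih =>
    intro i hk
    by_cases hi : i < adj.length
    · rw [scanB_lt_skip vis adj i hi (h (adj[i]) (List.getElem_mem hi))]
      exact ih (i + 1) (by omega)
    · exact scanB_ge vis adj i hi

lemma loop_none_of (g : List (List Int)) (e_ : Int) (f : Nat) (n : Int) :
    ∀ (adj : List Int) (vis : List Int), (∀ x ∈ adj, PySem.List.pyGetD vis x 0 ≠ -1) →
    dfsAloop g e_ f vis n adj = (none, vis) := by
  intro adj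
  induction adj with
  | nil => intro vis _; exact loop_nil g e_ f vis n
  | cons x xs ih =>
    intro vis h
    rw [loop_cons_skip g e_ f vis n x xs (h x (by simp))]
    exact ih vis (fun y hy => h y (by simp [hy]))

theorem dfs_spec : Claim_equal_dfs := by
  intro graph visited node end_ _ hpre
  show dfs graph visited node end_ = dfs_alt graph visited node end_
  rcases hpre with ⟨hne, _⟩ | ⟨hne, _, hskip⟩ | ⟨hne, hlen, hn0, hn1, he0, he1, hedges, hvals⟩
  · -- the start node is the target: both return visited[end] at once
    unfold dfs dfs_alt
    rw [ago_succ]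
    simp [hne]
  · -- no unvisited neighbour of the start node: both return None without descending
    have hA : dfs graph visited node end_ = none := by
      unfold dfs
      rw [ago_succ]
      simp only [hne, if_neg, not_false_iff]
      rw [loop_none_of graph end_ visited.length node (PySem.List.pyGetD graph node [])
        visited (fun x hx => (hskip x hx).2)]
    have hB : dfs_alt graph visited node end_ = none := by
      unfold dfs_alt
      simp only [hne, if_neg, not_false_iff]
      rw [show 2 * visited.length + 2 = (2 * visited.length + 1) + 1 from by omega,
        step_cons_none graph end_ (2 * visited.length + 1) node 0 [] visited
          (scanB_none_of visited (PySem.List.pyGetD graph node [])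
            (fun x hx => (hskip x hx).2) (PySem.List.pyGetD graph node []).length 0
            (by omega)),
        show 2 * visited.length + 1 = (2 * visited.length) + 1 from rfl, step_nil]
    rw [hA, hB]
  · -- a real descent: the stack machine simulates the recursion
    have hGG : GoodGraph graph := fun adj ha x hx => hedges adj ha x hx
    have hG : GoodVis graph visited := ⟨hlen, hvals⟩
    have hn : ValidNode graph node := ⟨hn0, hn1⟩
    unfold dfs dfs_alt
    simp only [hne, if_neg, not_false_iff]
    have hcl : cnt visited ≤ visited.length := cnt_le_length visited
    -- A with canonical fuel
    have hA : dfsAgo graph end_ (visited.length + 1) visited node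
        = dfsAgo graph end_ (cnt visited + 1) visited node :=
      (fuelIrrA graph end_ hGG (cnt visited)).1 _ _ visited node rfl (by omega) (by omega)
        hG hn
    rw [hA, ago_succ]
    simp only [hne, if_neg, not_false_iff]
    -- B with canonical fuel
    have hB : stepB graph end_ (2 * visited.length + 2) [(node, 0)] visited
        = stepC graph end_ [(node, 0)] visited := by
      unfold stepC
      refine fuelIrrB graph end_ hGG (cnt visited) _ _ _ _ rfl hG ?_
        (by simp only [List.length_cons, List.length_nil]; omega)
        (by simp only [List.length_cons, List.length_nil]; omega)
      intro y hy
      simp only [List.mem_cons, List.not_mem_nil, or_false] at hy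
      exact hy ▸ hn
    rw [hB, sim graph end_ hGG (cnt visited) visited node 0 [] rfl hG hn
      (fun y hy => absurd hy (List.not_mem_nil))]
    rw [List.drop_zero]
    rcases hr : dfsAloop graph end_ (cnt visited) visited node
      (PySem.List.pyGetD graph node []) with ⟨r, vis'⟩
    cases r with
    | some v => rfl
    | none =>
      show (none : Option Int) = stepC graph end_ [] vis'
      unfold stepC
      rw [show 2 * cnt vis' + ([] : List (Int × Nat)).length + 1 = 2 * cnt vis' + 1 from by
        simp]
      rw [step_nil]
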